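-- pv_equiv track=rewrite | github.com/mesejo/writings | ideas/two_way_search.py | lex_search
-- ===== SOURCE A (Python) =====
-- def lex_search(needle: str, len_needle: int, invert_alphabet: bool):
--     # Do a lexicographic search. Essentially this:
--     # >>> max(needle[i:] for i in range(len(needle)+1))
--     # Also find the period of the right half.
--     max_suffix = 0
--     candidate = 1
--     k = 0
--     # The period of the right half.
--     period = 1
--
--     while candidate + k < len_needle:
--         # each loop increases candidate + k + max_suffix
--         a = needle[candidate + k]
--         b = needle[max_suffix + k]
--         # check if the suffix at candidate is better than max_suffix
--         if invert_alphabet and b < a or not invert_alphabet and a < b: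
--             # Fell short of max_suffix.
--             # The next k + 1 characters are non-increasing
--             # from candidate, so they won't start a maximal suffix.
--             candidate += k + 1
--             k = 0
--             # We've ruled out any period smaller than what's
--             # been scanned since max_suffix.
--             period = candidate - max_suffix
--         elif a == b:
--             if k + 1 != period:
--                 # Keep scanning the equal strings
--                 k += 1
--             else:
--                 # Matched a whole period.
--                 # Start matching the next period.
--                 candidate += period
--                 k = 0
--         else:
--             # Did better than max_suffix, so replace it.
--             max_suffix = candidate
--             candidate += 1
--             k = 0
--             period = 1
--
--     return max_suffix, period
-- ===== SOURCE B (Python) =====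
-- def lex_search(needle: str, len_needle: int, invert_alphabet: bool):
--     # Two independent brute-force passes instead of A's online state machine:
--     # (1) the maximal suffix is found by directly comparing suffix key lists,
--     # (2) the period is the smallest p that the maximal suffix verifies directly.
--     n = len_needle
--     if n <= 0:
--         return 0, 1
--     s = needle[:n]
--     vals = [ord(ch) for ch in s]
--     if invert_alphabet:
--         vals = [-v for v in vals]
--     ms = 0
--     for i in range(1, n):
--         if vals[ms:] < vals[i:]:
--             ms = i
--     t = vals[ms:]
--     m = len(t)
--     p = 1
--     while any(t[i] != t[i + p] for i in range(m - p)):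
--         p += 1
--     return ms, p
-- ===== Notes on version B (the rewrite author's own statement) =====
-- stated objective: simpler
-- what changed: A's single online Duval-style state machine (candidate/offset/period maintained together with jump rules) is replaced by two independent brute-force passes: the maximal-suffix start is found as a plain argmax by directly comparing suffix key lists (sign-negated for the inverted alphabet), and the period is then found by directly testing p = 1, 2, ... against that suffix.
import Mathlib
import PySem

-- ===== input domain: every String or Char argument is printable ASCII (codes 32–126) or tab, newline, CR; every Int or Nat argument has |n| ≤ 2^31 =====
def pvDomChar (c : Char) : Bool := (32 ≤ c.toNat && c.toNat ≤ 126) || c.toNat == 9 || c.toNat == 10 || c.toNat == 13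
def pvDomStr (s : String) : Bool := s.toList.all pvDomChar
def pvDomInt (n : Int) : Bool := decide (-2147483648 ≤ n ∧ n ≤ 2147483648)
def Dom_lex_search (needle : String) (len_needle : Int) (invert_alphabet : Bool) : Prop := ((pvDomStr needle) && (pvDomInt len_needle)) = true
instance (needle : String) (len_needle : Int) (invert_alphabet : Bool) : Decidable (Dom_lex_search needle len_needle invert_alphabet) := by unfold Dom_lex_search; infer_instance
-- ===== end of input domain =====

-- B replaces A's online maximal-suffix state machine by two independent brute-force
-- passes (argmax of suffix key lists, then a direct smallest-period scan); objective:
-- simpler, not faster.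

-- ===== PORT A =====
-- literal transliteration of A's while loop; indices read via getD (exact inside Pre_)
def lexLoopA (s : List Char) (invert : Bool) (n ms cand k period : Nat) : Int × Int :=
  if _h : cand + k < n then
    let a := s.getD (cand + k) ' '
    let b := s.getD (ms + k) ' '
    if (invert && decide (b < a)) || (!invert && decide (a < b)) then
      lexLoopA s invert n ms (cand + k + 1) 0 (cand + k + 1 - ms)
    else if a = b then
      if k + 1 ≠ period then
        lexLoopA s invert n ms cand (k + 1) period
      else
        lexLoopA s invert n ms (cand + period) 0 period
    else
      lexLoopA s invert n cand (cand + 1) 0 1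
  else ((ms : Int), (period : Int))
termination_by (n - cand, n - k)
decreasing_by all_goals (simp_wf; omega)

def lex_search (needle : String) (len_needle : Int) (invert_alphabet : Bool) : Int × Int :=
  lexLoopA needle.toList invert_alphabet len_needle.toNat 0 1 0 1

-- ===== PORT B =====
-- Source B: vals = [ord(ch) for ch in s]; if invert: vals = [-v for v in vals]
def valsB (invert : Bool) (s : List Char) : List Int :=
  let vals := s.map (fun ch => (ch.toNat : Int))
  if invert then vals.map (fun v => -v) else vals

-- Source B: for i in range(1, n): if vals[ms:] < vals[i:]: ms = i
def msLoopB (vals : List Int) (n : Nat) : Nat :=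
  (List.range' 1 (n - 1) 1).foldl (fun ms i => if vals.drop ms < vals.drop i then i else ms) 0

-- Source B: while any(t[i] != t[i+p] for i in range(m - p)): p += 1
def periodLoopB (t : List Int) (p : Nat) : Nat :=
  if h : (List.range (t.length - p)).any (fun i => decide (t.getD i 0 ≠ t.getD (i + p) 0)) then
    periodLoopB t (p + 1)
  else p
termination_by t.length - p
decreasing_by
  simp only [List.any_eq_true, List.mem_range, decide_eq_true_eq] at h
  obtain ⟨i, hi, _⟩ := h
  omega

def lex_search_alt (needle : String) (len_needle : Int) (invert_alphabet : Bool) : Int × Int :=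
  if len_needle ≤ 0 then (0, 1)
  else
    let n := len_needle.toNat
    let s := needle.toList.take n
    let vals := valsB invert_alphabet s
    let ms := msLoopB vals n
    let t := vals.drop ms
    let p := periodLoopB t 1
    ((ms : Int), (p : Int))

-- ===== PRECONDITION & SPEC =====
-- A returns normally iff it never indexes past the needle: len_needle ≤ len(needle),
-- or len_needle ≤ 1 (the loop body never runs); otherwise Python raises IndexError.
def Pre_lex_search (needle : String) (len_needle : Int) (invert_alphabet : Bool) : Prop :=
  len_needle ≤ (needle.length : Int) ∨ len_needle ≤ 1
instance (needle : String) (len_needle : Int) (invert_alphabet : Bool) : Decidable (Pre_lex_search needle len_needle invert_alphabet) := by unfold Pre_lex_search; infer_instance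

def pvWitness_lex_search : String × Int × Bool := ("abaab", 5, false)

def Spec_lex_search (needle : String) (len_needle : Int) (invert_alphabet : Bool) (out : Int × Int) : Prop := out = lex_search_alt needle len_needle invert_alphabet
instance (needle : String) (len_needle : Int) (invert_alphabet : Bool) (out : Int × Int) : Decidable (Spec_lex_search needle len_needle invert_alphabet out) := by unfold Spec_lex_search; infer_instance

-- ===== CLAIM (what is proved, stated in full; the proofs are below) =====
def Claim_equal_lex_search : Prop := ∀ (needle : String) (len_needle : Int) (invert_alphabet : Bool), Dom_lex_search needle len_needle invert_alphabet → Pre_lex_search needle len_needle invert_alphabet → Spec_lex_search needle len_needle invert_alphabet (lex_search needle len_needle invert_alphabet)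

-- ===== LEMMAS AND PROOFS =====

-- ---- abstract view: encoded character values and suffix key lists ----

-- the encoded value B assigns to position q (ord, negated for the inverted alphabet)
def pvCv (s : List Char) (invert : Bool) (q : Nat) : Int :=
  match invert with
  | false => ((s.getD q ' ').toNat : Int)
  | true => -(((s.getD q ' ').toNat : Int))

-- the length-len key segment starting at q
def pvSeg (c : Nat → Int) (q len : Nat) : List Int :=
  (List.range len).map (fun i => c (q + i))

-- the key list of the suffix of s[:e] starting at q
def pvK (c : Nat → Int) (e q : Nat) : List Int := pvSeg c q (e - q)

-- abstract restatement of A's loop over encoded values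
def pvLoop (c : Nat → Int) (n ms j k p : Nat) : Nat × Nat :=
  if _h : j + k < n then
    if c (j + k) < c (ms + k) then
      pvLoop c n ms (j + k + 1) 0 (j + k + 1 - ms)
    else if c (j + k) = c (ms + k) then
      if k + 1 ≠ p then pvLoop c n ms j (k + 1) p
      else pvLoop c n ms (j + p) 0 p
    else pvLoop c n j (j + 1) 0 1
  else (ms, p)
termination_by (n - j, n - k)
decreasing_by all_goals (simp_wf; omega)

-- smallest period of the suffix starting at q (of s[:n])
def pvMinPer (c : Nat → Int) (n q : Nat) : Nat :=
  Nat.find (p := fun p => 0 < p ∧ ∀ x, x < n → q ≤ x → x + p < n → c x = c (x + p))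
    ⟨n + 1, Nat.succ_pos n, fun x _ _ hxx => absurd hxx (by omega)⟩

-- ---- generic list-order facts for key lists ----

lemma pvSeg_length (c : Nat → Int) (q len : Nat) : (pvSeg c q len).length = len := by
  simp [pvSeg]

lemma pvK_length (c : Nat → Int) (e q : Nat) : (pvK c e q).length = e - q := by
  simp [pvK, pvSeg_length]

lemma pvK_nil (c : Nat → Int) (e q : Nat) (h : e ≤ q) : pvK c e q = [] := by
  simp [pvK, pvSeg, Nat.sub_eq_zero_of_le h]

lemma pvSeg_split (c : Nat → Int) (q d1 d2 : Nat) :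
    pvSeg c q (d1 + d2) = pvSeg c q d1 ++ pvSeg c (q + d1) d2 := by
  simp [pvSeg, List.range_add, List.map_map, Function.comp_def, Nat.add_assoc]

lemma pvSeg_congr (c : Nat → Int) (q r len : Nat) (h : ∀ v < len, c (q + v) = c (r + v)) :
    pvSeg c q len = pvSeg c r len := by
  simp only [pvSeg]
  exact List.map_congr_left (fun i hi => h i (List.mem_range.mp hi))

lemma pvK_split (c : Nat → Int) (e q m : Nat) (h1 : q ≤ m) (h2 : m ≤ e) :
    pvK c e q = pvSeg c q (m - q) ++ pvK c e m := by
  have : e - q = (m - q) + (e - m) := by omega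
  rw [pvK, this, pvSeg_split]
  congr 2
  omega

lemma pvK_cons (c : Nat → Int) (e q : Nat) (h : q < e) :
    pvK c e q = c q :: pvK c e (q + 1) := by
  have h1 : e - q = 1 + (e - (q + 1)) := by omega
  rw [pvK, h1, pvSeg_split]
  have h2 : pvSeg c q 1 = [c q] := by simp [pvSeg]
  rw [h2, pvK]
  rfl

lemma pvNil_le (x : List Int) : ([] : List Int) ≤ x := by
  cases x with
  | nil => exact le_refl _
  | cons a l => exact le_of_lt (List.Lex.nil)

lemma pvLt_append_cons (x : List Int) (a : Int) (l : List Int) : x < x ++ a :: l := by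
  induction x with
  | nil => exact List.Lex.nil
  | cons b t ih => exact List.Lex.cons ih

lemma pvLe_append (x y : List Int) : x ≤ x ++ y := by
  cases y with
  | nil => simp
  | cons a l => exact le_of_lt (pvLt_append_cons x a l)

-- strict comparison decided at the first index where the keys differ
lemma pvLt_of_agree_lt (c : Nat → Int) (e1 e2 q r u : Nat)
    (hagree : ∀ v < u, c (q + v) = c (r + v))
    (hq : q + u < e1) (hr : r + u < e2) (hlt : c (q + u) < c (r + u)) :
    pvK c e1 q < pvK c e2 r := by
  have hsq : pvK c e1 q = pvSeg c q u ++ pvK c e1 (q + u) := by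
    have := pvK_split c e1 q (q + u) (by omega) (by omega)
    simpa using this
  have hsr : pvK c e2 r = pvSeg c r u ++ pvK c e2 (r + u) := by
    have := pvK_split c e2 r (r + u) (by omega) (by omega)
    simpa using this
  rw [hsq, hsr, pvSeg_congr c q r u hagree]
  apply List.append_left_lt
  rw [pvK_cons c e1 (q + u) hq, pvK_cons c e2 (r + u) hr]
  exact List.Lex.rel hlt

-- non-strict comparison when the left key runs out while still agreeing
lemma pvLe_of_agree_prefix (c : Nat → Int) (e1 e2 q r u : Nat)
    (hagree : ∀ v < u, c (q + v) = c (r + v))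
    (hq : e1 ≤ q + u) (hr : r + u ≤ e2) :
    pvK c e1 q ≤ pvK c e2 r := by
  by_cases hqe : q ≤ e1
  · have h1 : pvK c e1 q = pvSeg c q (e1 - q) := rfl
    have h2 : pvK c e2 r = pvSeg c r (e1 - q) ++ pvK c e2 (r + (e1 - q)) := by
      have := pvK_split c e2 r (r + (e1 - q)) (by omega) (by omega)
      rwa [Nat.add_sub_cancel_left] at this
    rw [h1, h2, pvSeg_congr c q r (e1 - q) (fun v hv => hagree v (by omega))]
    exact pvLe_append _ _
  · rw [pvK_nil c e1 q (by omega)]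
    exact pvNil_le _

-- ---- the invariant of A's loop ----

structure pvInv (c : Nat → Int) (n ms j k p : Nat) : Prop where
  h1 : ms < j
  h2 : k < p
  h3 : j + k ≤ n
  h4 : ms + p ≤ j
  h5 : ∃ A, 1 ≤ A ∧ j = ms + A * p
  h6 : ∀ t < k, c (ms + t) = c (j + t)
  h7 : ∀ x, ms ≤ x → x + p < j + k → c x = c (x + p)
  h8 : ∀ q, 0 < q → q < p → ∃ x, ms ≤ x ∧ x + q < j + k ∧ c x ≠ c (x + q)
  h9 : ∀ q, ms ≤ q → pvK c (j + k) q ≤ pvK c (j + k) ms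

-- positions congruent mod p inside the region carry equal values
lemma pvPerShift (c : Nat → Int) (ms e p : Nat)
    (hper : ∀ x, ms ≤ x → x + p < e → c x = c (x + p)) (hp : 0 < p) :
    ∀ i x, ms ≤ x → x + i * p < e → c x = c (x + i * p) := by
  intro i
  induction i with
  | zero => intro x _ _; simp
  | succ i ih =>
    intro x hx hxe
    have h1 : c x = c (x + i * p) := ih x hx (by nlinarith)
    have h2 : c (x + i * p) = c (x + i * p + p) := hper (x + i * p) (by omega) (by nlinarith)
    rw [h1, h2]; ring_nf

-- Lemma S: inside a self-maximal region with smallest period p, the suffix at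
-- offset t ∈ (0,p) falls strictly below the region within the first p - t characters
lemma pvLemS (c : Nat → Int) (ms e p : Nat) (m : Nat) (hm : m = e - ms) (hpm : p ≤ m)
    (_hp : 0 < p) (hms : ms + m = e)
    (hper : ∀ x, ms ≤ x → x + p < e → c x = c (x + p))
    (hmin : ∀ q, 0 < q → q < p → ∃ x, ms ≤ x ∧ x + q < e ∧ c x ≠ c (x + q))
    (hmax : ∀ q, ms ≤ q → pvK c e q ≤ pvK c e ms)
    (t : Nat) (ht0 : 0 < t) (htp : t < p) :
    ∃ u, t + u < p ∧ (∀ v < u, c (ms + t + v) = c (ms + v)) ∧ c (ms + t + u) < c (ms + u) := by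
  have hex0 : ∃ v, v + t < m ∧ c (ms + t + v) ≠ c (ms + v) := by
    obtain ⟨x, hx, hxe, hne⟩ := hmin t ht0 htp
    refine ⟨x - ms, by omega, ?_⟩
    rw [show ms + t + (x - ms) = x + t by omega, show ms + (x - ms) = x by omega]
    exact fun hEq => hne hEq.symm
  set u0 := Nat.find hex0 with hu0def
  have hu0 := Nat.find_spec hex0
  have hbefore : ∀ v < u0, c (ms + t + v) = c (ms + v) := by
    intro v hv
    by_contra hne
    exact absurd (⟨by omega, hne⟩ : v + t < m ∧ c (ms + t + v) ≠ c (ms + v))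
      (Nat.find_min hex0 hv)
  have hstrict : c (ms + t + u0) < c (ms + u0) := by
    rcases lt_trichotomy (c (ms + t + u0)) (c (ms + u0)) with h | h | h
    · exact h
    · exact absurd h hu0.2
    · exfalso
      apply absurd (hmax (ms + t) (by omega))
      apply not_le.mpr
      apply pvLt_of_agree_lt c e e ms (ms + t) u0
      · intro v hv; exact (hbefore v hv).symm
      · omega
      · omega
      · exact h
  refine ⟨u0, ?_, hbefore, hstrict⟩
  by_contra hbad
  have hdu0 : p - t ≤ u0 := by omega
  by_cases Hd : ∀ v, v + (p - t) < m → c (ms + v) = c (ms + ((p - t) + v))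
  · obtain ⟨x, hx, hxe, hne⟩ := hmin (p - t) (by omega) (by omega)
    apply hne
    have := Hd (x - ms) (by omega)
    rwa [show ms + (x - ms) = x by omega,
      show ms + ((p - t) + (x - ms)) = x + (p - t) by omega] at this
  · push Not at Hd
    have hex1 : ∃ v, v + (p - t) < m ∧ c (ms + v) ≠ c (ms + ((p - t) + v)) := Hd
    set u1 := Nat.find hex1 with hu1def
    have hu1 := Nat.find_spec hex1
    have hbefore1 : ∀ v < u1, c (ms + v) = c (ms + ((p - t) + v)) := by
      intro v hv
      by_contra hne
      exact absurd (⟨by omega, hne⟩ : v + (p - t) < m ∧ c (ms + v) ≠ c (ms + ((p - t) + v)))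
        (Nat.find_min hex1 hv)
    have hstrict1 : c (ms + ((p - t) + u1)) < c (ms + u1) := by
      rcases lt_trichotomy (c (ms + ((p - t) + u1))) (c (ms + u1)) with h | h | h
      · exact h
      · exact absurd h.symm hu1.2
      · exfalso
        apply absurd (hmax (ms + (p - t)) (by omega))
        apply not_le.mpr
        apply pvLt_of_agree_lt c e e ms (ms + (p - t)) u1
        · intro v hv
          rw [show ms + (p - t) + v = ms + ((p - t) + v) by omega]
          exact hbefore1 v hv
        · omega
        · omega
        · rw [show ms + (p - t) + u1 = ms + ((p - t) + u1) by omega]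
          exact h
    have hmid : ∀ v, (p - t) ≤ v → v + t < m → c (ms + t + v) = c (ms + (v - (p - t))) := by
      intro v hdv hv
      have e1 : c (ms + (v - (p - t))) = c (ms + (v - (p - t)) + p) :=
        hper (ms + (v - (p - t))) (by omega) (by omega)
      have e2 : ms + (v - (p - t)) + p = ms + t + v := by omega
      rw [e1, e2]
    by_cases hSmall : u1 < m - p
    · apply absurd (hmax (ms + t) (by omega))
      apply not_le.mpr
      apply pvLt_of_agree_lt c e e ms (ms + t) ((p - t) + u1)
      · intro v hv
        rcases Nat.lt_or_ge v (p - t) with h | h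
        · exact (hbefore v (by omega)).symm
        · have h1 : c (ms + t + v) = c (ms + (v - (p - t))) := hmid v h (by omega)
          have h2 : c (ms + (v - (p - t))) = c (ms + ((p - t) + (v - (p - t)))) :=
            hbefore1 (v - (p - t)) (by omega)
          rw [show ms + ((p - t) + (v - (p - t))) = ms + v by omega] at h2
          rw [← h2]
          exact h1.symm
      · omega
      · omega
      · have h3 : c ((ms + t) + ((p - t) + u1)) = c (ms + u1) := by
          have e1 : c (ms + u1) = c (ms + u1 + p) := hper (ms + u1) (by omega) (by omega)
          rw [show (ms + t) + ((p - t) + u1) = ms + u1 + p by omega, ← e1]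
        rw [h3]
        exact hstrict1
    · have hTper : ∀ v, v + t < m → c (ms + t + v) = c (ms + v) := by
        intro v hv
        rcases Nat.lt_or_ge v (p - t) with h | h
        · exact hbefore v (by omega)
        · have h1 : c (ms + t + v) = c (ms + (v - (p - t))) := hmid v h hv
          have h2 : c (ms + (v - (p - t))) = c (ms + ((p - t) + (v - (p - t)))) :=
            hbefore1 (v - (p - t)) (by omega)
          rw [show ms + ((p - t) + (v - (p - t))) = ms + v by omega] at h2
          rw [h1, h2]
      exact absurd (hTper u0 hu0.1) hu0.2

-- Lemma M: if t ≥ p is a period of the region, the character after the border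
-- (region index m - t) is at least the period-continuation character c (ms + k)
lemma pvLemM (c : Nat → Int) (ms e p k A : Nat) (m : Nat) (hm : ms + m = e)
    (hp : 0 < p) (hA : 1 ≤ A) (hmA : m = A * p + k) (hk : k < p)
    (hper : ∀ x, ms ≤ x → x + p < e → c x = c (x + p))
    (_hmin : ∀ q, 0 < q → q < p → ∃ x, ms ≤ x ∧ x + q < e ∧ c x ≠ c (x + q))
    (hmax : ∀ q, ms ≤ q → pvK c e q ≤ pvK c e ms)
    (t : Nat) (hpt : p ≤ t) (htm : t ≤ m)
    (hpert : ∀ v, v + t < m → c (ms + v) = c (ms + t + v)) :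
    c (ms + k) ≤ c (ms + (m - t)) := by
  have hApk : (A - 1) * p = A * p - p := Nat.sub_one_mul A p
  have hpAp : p ≤ A * p := Nat.le_mul_of_pos_left p (by omega)
  have hbm : c (ms + k) = c (ms + (m - p)) := by
    have h1 : ms + k + (A - 1) * p = ms + (m - p) := by omega
    have h2 := pvPerShift c ms e p hper hp (A - 1) (ms + k) (by omega) (by omega)
    rwa [h1] at h2
  by_cases hT : t = p
  · rw [hT, ← hbm]
  · have htp' : p < t := lt_of_le_of_ne hpt (Ne.symm hT)
    by_contra hcon
    have hcon' : c (ms + (m - t)) < c (ms + k) := not_le.mp hcon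
    apply absurd (hmax (ms + (t - p)) (by omega))
    apply not_le.mpr
    apply pvLt_of_agree_lt c e e ms (ms + (t - p)) (m - t)
    · intro v hv
      have e1 : c (ms + (t - p) + v) = c (ms + (t - p) + v + p) :=
        hper (ms + (t - p) + v) (by omega) (by omega)
      have e2 : ms + (t - p) + v + p = ms + t + v := by omega
      rw [e1, e2]
      exact hpert v (by omega)
    · omega
    · omega
    · have e3 : ms + (t - p) + (m - t) = ms + (m - p) := by omega
      rw [e3, ← hbm]
      exact hcon'

-- first place where the suffix at offset t differs from the region is a strict drop
lemma pvFirstDiff (c : Nat → Int) (ms e m t : Nat) (hm : ms + m = e)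
    (hmax : ∀ q, ms ≤ q → pvK c e q ≤ pvK c e ms)
    (hnot : ¬ ∀ v, v + t < m → c (ms + t + v) = c (ms + v)) :
    ∃ u, u + t < m ∧ (∀ v < u, c (ms + t + v) = c (ms + v)) ∧ c (ms + t + u) < c (ms + u) := by
  push Not at hnot
  obtain ⟨v0, hv0, hne0⟩ := hnot
  have hex : ∃ v, v + t < m ∧ c (ms + t + v) ≠ c (ms + v) := ⟨v0, hv0, hne0⟩
  set u0 := Nat.find hex with hu0def
  have hu0 := Nat.find_spec hex
  have hbefore : ∀ v < u0, c (ms + t + v) = c (ms + v) := by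
    intro v hv
    by_contra hne
    exact absurd (⟨by omega, hne⟩ : v + t < m ∧ c (ms + t + v) ≠ c (ms + v))
      (Nat.find_min hex hv)
  refine ⟨u0, hu0.1, hbefore, ?_⟩
  rcases lt_trichotomy (c (ms + t + u0)) (c (ms + u0)) with h | h | h
  · exact h
  · exact absurd h hu0.2
  · exfalso
    apply absurd (hmax (ms + t) (by omega))
    apply not_le.mpr
    apply pvLt_of_agree_lt c e e ms (ms + t) u0
    · intro v hv; exact (hbefore v hv).symm
    · omega
    · omega
    · exact h

-- appending the period-continuation (or a smaller) character keeps the region self-maximal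
lemma pvExtendMax (c : Nat → Int) (ms e p k A m : Nat) (hm : ms + m = e)
    (hp : 0 < p) (hA : 1 ≤ A) (hmA : m = A * p + k) (hk : k < p)
    (hper : ∀ x, ms ≤ x → x + p < e → c x = c (x + p))
    (hmin : ∀ q, 0 < q → q < p → ∃ x, ms ≤ x ∧ x + q < e ∧ c x ≠ c (x + q))
    (hmax : ∀ q, ms ≤ q → pvK c e q ≤ pvK c e ms)
    (hab : c e ≤ c (ms + k)) :
    ∀ q, ms ≤ q → pvK c (e + 1) q ≤ pvK c (e + 1) ms := by
  intro q hq
  rcases Nat.eq_or_lt_of_le hq with hqe | hmslt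
  · rw [← hqe]
  · by_cases hqbig : e + 1 ≤ q
    · rw [pvK_nil c (e + 1) q hqbig]
      exact pvNil_le _
    · have hApos : 0 < A * p := Nat.mul_pos (by omega) hp
      have hqidx : q = ms + (q - ms) := by omega
      set t := q - ms with htdef
      have ht0 : 0 < t := by omega
      have htm : t ≤ m := by omega
      by_cases hTp : ∀ v, v + t < m → c (ms + t + v) = c (ms + v)
      · have htp : p ≤ t := by
          by_contra hcon
          obtain ⟨x, hx, hxe, hne⟩ := hmin t ht0 (by omega)
          apply hne
          have := hTp (x - ms) (by omega)
          rwa [show ms + t + (x - ms) = x + t by omega,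
            show ms + (x - ms) = x by omega, eq_comm] at this
        have hble : c (ms + k) ≤ c (ms + (m - t)) := by
          apply pvLemM c ms e p k A m hm hp hA hmA hk hper hmin hmax t htp htm
          intro v hv
          exact (hTp v hv).symm
        have hchar : c e ≤ c (ms + (m - t)) := le_trans hab hble
        rcases lt_or_eq_of_le hchar with hl | hl
        · apply le_of_lt
          apply pvLt_of_agree_lt c (e + 1) (e + 1) q ms (m - t)
          · intro v hv
            rw [hqidx, show ms + (t) + v = ms + t + v from rfl]
            exact hTp v (by omega)
          · omega
          · omega
          · rw [show q + (m - t) = e by omega]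
            exact hl
        · apply pvLe_of_agree_prefix c (e + 1) (e + 1) q ms (m - t + 1)
          · intro v hv
            rcases Nat.lt_or_ge v (m - t) with hv2 | hv2
            · rw [hqidx]
              exact hTp v (by omega)
            · have hve : v = m - t := by omega
              rw [hve, show q + (m - t) = e by omega]
              exact hl
          · omega
          · omega
      · obtain ⟨u0, hu0m, hb, hs⟩ := pvFirstDiff c ms e m t hm hmax hTp
        apply le_of_lt
        apply pvLt_of_agree_lt c (e + 1) (e + 1) q ms u0
        · intro v hv
          rw [hqidx]
          exact hb v hv
        · omega
        · omega
        · rw [hqidx]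
          exact hs

-- the period extends over the appended matching character
lemma pvExtendPer (c : Nat → Int) (ms e p k A m : Nat) (hm : ms + m = e)
    (hp : 0 < p) (hA : 1 ≤ A) (hmA : m = A * p + k) (_hk : k < p)
    (hper : ∀ x, ms ≤ x → x + p < e → c x = c (x + p))
    (heq : c e = c (ms + k)) :
    ∀ x, ms ≤ x → x + p < e + 1 → c x = c (x + p) := by
  intro x hx hxe
  rcases Nat.lt_or_ge (x + p) e with h | h
  · exact hper x hx h
  · have hxp : x + p = e := by omega
    have hApk : (A - 1) * p = A * p - p := Nat.sub_one_mul A p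
    have hpAp : p ≤ A * p := Nat.le_mul_of_pos_left p (by omega)
    have hxval : x = ms + k + (A - 1) * p := by omega
    have h2 := pvPerShift c ms e p hper hp (A - 1) (ms + k) (by omega) (by omega)
    rw [hxval, ← h2, show ms + k + (A - 1) * p + p = e by omega]
    exact heq.symm

-- candidates scanned past in the fell-short branch lose strictly to the maximal suffix
lemma pvRemoveLt (c : Nat → Int) (n ms j k p : Nat)
    (hmsj : ms < j) (hkp : k < p) (h4 : ms + p ≤ j) (hlt : j + k < n)
    (h6 : ∀ t < k, c (ms + t) = c (j + t))
    (hper : ∀ x, ms ≤ x → x + p < j + k → c x = c (x + p))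
    (hmin : ∀ q, 0 < q → q < p → ∃ x, ms ≤ x ∧ x + q < j + k ∧ c x ≠ c (x + q))
    (hmax : ∀ q, ms ≤ q → pvK c (j + k) q ≤ pvK c (j + k) ms)
    (hc : c (j + k) < c (ms + k)) :
    ∀ t, t ≤ k → pvK c n (j + t) < pvK c n ms := by
  intro t ht
  rcases Nat.eq_zero_or_pos t with ht0 | ht0
  · rw [ht0, Nat.add_zero]
    apply pvLt_of_agree_lt c n n j ms k
    · intro v hv; exact (h6 v hv).symm
    · omega
    · omega
    · exact hc
  · obtain ⟨u0, htu, hb, hs⟩ := pvLemS c ms (j + k) p (j + k - ms) rfl (by omega) (by omega)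
      (by omega) hper hmin hmax t ht0 (by omega)
    rcases Nat.lt_or_ge u0 (k - t) with hcase | hcase
    · apply pvLt_of_agree_lt c n n (j + t) ms u0
      · intro v hv
        have h1 : c (ms + (t + v)) = c (j + (t + v)) := h6 (t + v) (by omega)
        have h2 : c (ms + t + v) = c (ms + v) := hb v hv
        rw [show (j + t) + v = j + (t + v) by omega, ← h1,
          show ms + (t + v) = ms + t + v by omega, h2]
      · omega
      · omega
      · have h1 : c (ms + (t + u0)) = c (j + (t + u0)) := h6 (t + u0) (by omega)
        rw [show (j + t) + u0 = j + (t + u0) by omega, ← h1,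
          show ms + (t + u0) = ms + t + u0 by omega]
        exact hs
    · apply pvLt_of_agree_lt c n n (j + t) ms (k - t)
      · intro v hv
        have h1 : c (ms + (t + v)) = c (j + (t + v)) := h6 (t + v) (by omega)
        have h2 : c (ms + t + v) = c (ms + v) := hb v (by omega)
        rw [show (j + t) + v = j + (t + v) by omega, ← h1,
          show ms + (t + v) = ms + t + v by omega, h2]
      · omega
      · omega
      · rw [show (j + t) + (k - t) = j + k by omega]
        rcases Nat.lt_or_ge (k - t) u0 with hcase2 | hcase2
        · have h2 : c (ms + t + (k - t)) = c (ms + (k - t)) := hb (k - t) hcase2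
          rw [show ms + t + (k - t) = ms + k by omega] at h2
          rw [← h2]
          exact hc
        · have hu0eq : u0 = k - t := by omega
          have h2 : c (ms + t + u0) < c (ms + u0) := hs
          rw [hu0eq, show ms + t + (k - t) = ms + k by omega] at h2
          exact lt_trans hc h2
 
-- candidates scanned past in the matched-period branch (offsets 0 < t < p)
lemma pvRemoveMatch (c : Nat → Int) (n ms j p A t : Nat) (hp : 0 < p) (hA : 1 ≤ A)
    (hAj : j = ms + A * p) (hjn : j + p ≤ n)
    (hper1 : ∀ x, ms ≤ x → x + p < j + p → c x = c (x + p))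
    (hmin : ∀ q, 0 < q → q < p → ∃ x, ms ≤ x ∧ x + q < j + p ∧ c x ≠ c (x + q))
    (hmax1 : ∀ q, ms ≤ q → pvK c (j + p) q ≤ pvK c (j + p) ms)
    (ht0 : 0 < t) (htp : t < p) :
    pvK c n (j + t) < pvK c n ms := by
  have hpAp : p ≤ A * p := Nat.le_mul_of_pos_left p (by omega)
  obtain ⟨u0, htu, hb, hs⟩ := pvLemS c ms (j + p) p (j + p - ms) rfl (by omega) hp
    (by omega) hper1 hmin hmax1 t ht0 htp
  have hshift : ∀ w, t + w < p → c (ms + t + w) = c ((j + t) + w) := by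
    intro w hw
    have h1 := pvPerShift c ms (j + p) p hper1 hp A (ms + t + w) (by omega) (by omega)
    rw [h1]
    congr 1
    omega
  apply pvLt_of_agree_lt c n n (j + t) ms u0
  · intro v hv
    rw [← hshift v (by omega)]
    exact hb v hv
  · omega
  · omega
  · rw [← hshift u0 (by omega)]
    exact hs

-- the continuing candidate j itself never beats every remaining candidate
lemma pvChainJ (c : Nat → Int) (n ms j p A : Nat) (hp : 0 < p) (hA : 1 ≤ A)
    (hAj : j = ms + A * p) (hjn : j + p ≤ n)
    (hper1 : ∀ x, ms ≤ x → x + p < j + p → c x = c (x + p))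
    (Mv : List Int)
    (hMms : pvK c n ms ≤ Mv)
    (hMe1 : j + p < n → pvK c n (j + p) ≤ Mv) :
    pvK c n j ≤ Mv := by
  have hpAp : p ≤ A * p := Nat.le_mul_of_pos_left p (by omega)
  have hshift := pvPerShift c ms (j + p) p hper1 hp
  have hseg : ∀ i, i ≤ A → pvSeg c (ms + i * p) p = pvSeg c ms p := by
    intro i hi
    symm
    apply pvSeg_congr
    intro v hv
    have hip : i * p ≤ A * p := Nat.mul_le_mul_right p hi
    have h1 := hshift i (ms + v) (by omega) (by omega)
    rw [h1]
    congr 1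
    omega
  have hdec : ∀ i, i ≤ A → pvK c n (ms + i * p) = pvSeg c ms p ++ pvK c n (ms + (i + 1) * p) := by
    intro i hi
    have hip : i * p ≤ A * p := Nat.mul_le_mul_right p hi
    have h1 := pvK_split c n (ms + i * p) (ms + i * p + p) (by omega) (by omega)
    rw [show ms + i * p + p - (ms + i * p) = p by omega] at h1
    rw [hseg i hi] at h1
    rw [show ms + (i + 1) * p = ms + i * p + p by rw [Nat.succ_mul]; ring]
    exact h1
  have hXA : ms + A * p = j := by omega
  have hXA1 : ms + (A + 1) * p = j + p := by rw [Nat.succ_mul]; omega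
  rcases lt_trichotomy (pvK c n j) (pvK c n ms) with h | h | h
  · exact le_trans (le_of_lt h) hMms
  · exfalso
    have hl := congrArg List.length h
    rw [pvK_length, pvK_length] at hl
    omega
  · rcases lt_trichotomy (pvK c n j) (pvK c n (j + p)) with h1 | h1 | h1
    · have hjp : j + p < n := by
        by_contra hge
        rw [pvK_nil c n (j + p) (by omega)] at h1
        exact (List.not_lt_nil _ h1 : False)
      exact le_trans (le_of_lt h1) (hMe1 hjp)
    · exfalso
      have hl := congrArg List.length h1
      rw [pvK_length, pvK_length] at hl
      omega
    · exfalso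
      have hstep : ∀ d, d ≤ A → pvK c n (ms + (A + 1 - d) * p) < pvK c n (ms + (A - d) * p) := by
        intro d
        induction d with
        | zero =>
          intro _
          rw [Nat.sub_zero, Nat.sub_zero, hXA1, hXA]
          exact h1
        | succ d ihd =>
          intro hdA
          have hprev := ihd (by omega)
          have h2 := List.append_left_lt (l₁ := pvSeg c ms p) hprev
          have e1 : pvSeg c ms p ++ pvK c n (ms + (A + 1 - d) * p) = pvK c n (ms + (A - d) * p) := by
            rw [hdec (A - d) (by omega), show A - d + 1 = A + 1 - d by omega]
          have e2 : pvSeg c ms p ++ pvK c n (ms + (A - d) * p) = pvK c n (ms + (A - d - 1) * p) := by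
            rw [hdec (A - d - 1) (by omega), show A - d - 1 + 1 = A - d by omega]
          rw [e1, e2] at h2
          rw [show A + 1 - (d + 1) = A - d by omega, show A - (d + 1) = A - d - 1 by omega]
          exact h2
      have hchain : ∀ i, i ≤ A → pvK c n (ms + A * p) ≤ pvK c n (ms + (A - i) * p) := by
        intro i
        induction i with
        | zero =>
          intro _
          rw [Nat.sub_zero]
        | succ i ihi =>
          intro hiA
          have hih := ihi (by omega)
          have hs := hstep (i + 1) hiA
          rw [show A + 1 - (i + 1) = A - i by omega] at hs
          exact le_trans hih (le_of_lt hs)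
      have hfinal := hchain A (le_refl A)
      rw [Nat.sub_self, Nat.zero_mul, Nat.add_zero, hXA] at hfinal
      exact absurd hfinal (not_le.mpr h)

-- the main correctness theorem for A's loop
theorem pvMain (c : Nat → Int) (n : Nat) :
    ∀ ms j k p, pvInv c n ms j k p →
      ((pvLoop c n ms j k p).1 = ms ∨ (j ≤ (pvLoop c n ms j k p).1 ∧ (pvLoop c n ms j k p).1 < n)) ∧
      (pvLoop c n ms j k p).1 < n ∧
      (∀ q, (q = ms ∨ (j ≤ q ∧ q < n)) → pvK c n q ≤ pvK c n (pvLoop c n ms j k p).1) ∧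
      (pvLoop c n ms j k p).2 = pvMinPer c n (pvLoop c n ms j k p).1 := by
  intro ms0 j0 k0 p0
  induction ms0, j0, k0, p0 using pvLoop.induct c n with
  | case1 ms j k p h hc ih =>
    intro inv
    obtain ⟨A, hA1, hAj⟩ := inv.h5
    have hpAp : p ≤ A * p := Nat.le_mul_of_pos_left p (by omega)
    have hmsj := inv.h1
    have hkp := inv.h2
    have h4 := inv.h4
    have hstep : pvLoop c n ms j k p = pvLoop c n ms (j + k + 1) 0 (j + k + 1 - ms) := by
      rw [pvLoop, dif_pos h, if_pos hc]
    have inv' : pvInv c n ms (j + k + 1) 0 (j + k + 1 - ms) := by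
      refine ⟨by omega, by omega, by omega, by omega, ⟨1, le_refl 1, by omega⟩,
        (fun t ht => absurd ht (Nat.not_lt_zero t)), (fun x hx hxe => absurd hxe (by omega)),
        ?_, ?_⟩
      · intro q hq0 hqp
        by_contra hno
        push Not at hno
        rcases Nat.lt_or_ge q p with hqp2 | hqp2
        · obtain ⟨x, hx, hxe, hne⟩ := inv.h8 q hq0 hqp2
          exact hne (hno x hx (by omega))
        · have hqm : q ≤ j + k - ms := by omega
          have hpert : ∀ v, v + q < (j + k - ms) → c (ms + v) = c (ms + q + v) := by
            intro v hv
            have hv2 := hno (ms + v) (by omega) (by omega)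
            rw [hv2]
            congr 1
            omega
          have hble := pvLemM c ms (j + k) p k A (j + k - ms) (by omega) (by omega) hA1
            (by omega) inv.h2 inv.h7 inv.h8 inv.h9 q hqp2 hqm hpert
          have hfin := hno (ms + ((j + k - ms) - q)) (by omega) (by omega)
          rw [show ms + ((j + k - ms) - q) + q = j + k by omega] at hfin
          rw [hfin] at hble
          exact absurd hble (not_le.mpr hc)
      · exact pvExtendMax c ms (j + k) p k A (j + k - ms) (by omega) (by omega) hA1
          (by omega) inv.h2 inv.h7 inv.h8 inv.h9 (le_of_lt hc)
    have IHres := ih inv'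
    rw [hstep]
    refine ⟨?_, IHres.2.1, ?_, IHres.2.2.2⟩
    · rcases IHres.1 with h1 | h1
      · exact Or.inl h1
      · exact Or.inr ⟨by omega, h1.2⟩
    · intro q hq
      rcases hq with rfl | ⟨hjq, hqn⟩
      · exact IHres.2.2.1 q (Or.inl rfl)
      · rcases Nat.lt_or_ge q (j + k + 1) with hql | hql
        · have hrem := pvRemoveLt c n ms j k p inv.h1 inv.h2 inv.h4 h inv.h6 inv.h7
            inv.h8 inv.h9 hc (q - j) (by omega)
          rw [show j + (q - j) = q by omega] at hrem
          exact le_trans (le_of_lt hrem) (IHres.2.2.1 ms (Or.inl rfl))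
        · exact IHres.2.2.1 q (Or.inr ⟨hql, hqn⟩)
  | case2 ms j k p h hc heq hk ih =>
    intro inv
    obtain ⟨A, hA1, hAj⟩ := inv.h5
    have hk2 := inv.h2
    have hstep : pvLoop c n ms j k p = pvLoop c n ms j (k + 1) p := by
      rw [pvLoop, dif_pos h, if_neg hc, if_pos heq, if_pos hk]
    have inv' : pvInv c n ms j (k + 1) p := by
      refine ⟨inv.h1, by omega, by omega, inv.h4, ⟨A, hA1, hAj⟩, ?_, ?_, ?_, ?_⟩
      · intro t ht
        rcases Nat.lt_or_ge t k with ht2 | ht2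
        · exact inv.h6 t ht2
        · have htk : t = k := by omega
          rw [htk]
          exact heq.symm
      · have base := pvExtendPer c ms (j + k) p k A (j + k - ms) (by omega)
          (by have := inv.h2; omega) hA1 (by omega) inv.h2 inv.h7 heq
        intro x hx hxe
        exact base x hx (by omega)
      · intro q hq0 hqp
        obtain ⟨x, hx, hxe, hne⟩ := inv.h8 q hq0 hqp
        exact ⟨x, hx, by omega, hne⟩
      · have base := pvExtendMax c ms (j + k) p k A (j + k - ms) (by omega)
          (by have := inv.h2; omega) hA1 (by omega) inv.h2 inv.h7 inv.h8 inv.h9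
          (le_of_eq heq)
        intro q hq
        have h2 := base q hq
        rwa [show j + k + 1 = j + (k + 1) by omega] at h2
    rw [hstep]
    exact ih inv'
  | case3 ms j k p h hc heq hk ih =>
    intro inv
    obtain ⟨A, hA1, hAj⟩ := inv.h5
    have hpAp : p ≤ A * p := Nat.le_mul_of_pos_left p (by have := inv.h2; omega)
    have hkp1 : k + 1 = p := not_not.mp hk
    have hp0 : 0 < p := by have := inv.h2; omega
    have hstep : pvLoop c n ms j k p = pvLoop c n ms (j + p) 0 p := by
      rw [pvLoop, dif_pos h, if_neg hc, if_pos heq, if_neg hk]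
    have hper1 : ∀ x, ms ≤ x → x + p < j + p → c x = c (x + p) := by
      have base := pvExtendPer c ms (j + k) p k A (j + k - ms) (by omega) hp0 hA1
        (by omega) inv.h2 inv.h7 heq
      intro x hx hxe
      exact base x hx (by omega)
    have hmax1 : ∀ q, ms ≤ q → pvK c (j + p) q ≤ pvK c (j + p) ms := by
      have base := pvExtendMax c ms (j + k) p k A (j + k - ms) (by omega) hp0 hA1
        (by omega) inv.h2 inv.h7 inv.h8 inv.h9 (le_of_eq heq)
      intro q hq
      have h2 := base q hq
      rwa [show j + k + 1 = j + p by omega] at h2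
    have hmin1 : ∀ q, 0 < q → q < p → ∃ x, ms ≤ x ∧ x + q < j + p ∧ c x ≠ c (x + q) := by
      intro q hq0 hqp
      obtain ⟨x, hx, hxe, hne⟩ := inv.h8 q hq0 hqp
      exact ⟨x, hx, by omega, hne⟩
    have inv' : pvInv c n ms (j + p) 0 p := by
      refine ⟨by omega, hp0, by omega, by omega, ⟨A + 1, by omega, by rw [Nat.succ_mul]; omega⟩,
        (fun t ht => absurd ht (Nat.not_lt_zero t)), ?_, ?_, ?_⟩
      · intro x hx hxe
        exact hper1 x hx (by omega)
      · intro q hq0 hqp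
        obtain ⟨x, hx, hxe, hne⟩ := hmin1 q hq0 hqp
        exact ⟨x, hx, by omega, hne⟩
      · intro q hq
        have h2 := hmax1 q hq
        rwa [show j + p = j + p + 0 by omega] at h2
    have IHres := ih inv'
    rw [hstep]
    have hMms : pvK c n ms ≤ pvK c n (pvLoop c n ms (j + p) 0 p).1 :=
      IHres.2.2.1 ms (Or.inl rfl)
    refine ⟨?_, IHres.2.1, ?_, IHres.2.2.2⟩
    · rcases IHres.1 with h1 | h1
      · exact Or.inl h1
      · exact Or.inr ⟨by omega, h1.2⟩
    · intro q hq
      rcases hq with rfl | ⟨hjq, hqn⟩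
      · exact hMms
      · rcases Nat.lt_or_ge q (j + p) with hql | hql
        · rcases Nat.eq_or_lt_of_le hjq with hq0 | hq0
          · rw [← hq0]
            exact pvChainJ c n ms j p A hp0 hA1 hAj (by omega) hper1 _ hMms
              (fun hjpn => IHres.2.2.1 (j + p) (Or.inr ⟨le_refl _, hjpn⟩))
          · have hrem := pvRemoveMatch c n ms j p A (q - j) hp0 hA1 hAj (by omega)
              hper1 hmin1 hmax1 (by omega) (by omega)
            rw [show j + (q - j) = q by omega] at hrem
            exact le_trans (le_of_lt hrem) hMms
        · exact IHres.2.2.1 q (Or.inr ⟨hql, hqn⟩)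
  | case4 ms j k p h hc heq ih =>
    intro inv
    have hgt : c (ms + k) < c (j + k) := by
      rcases lt_trichotomy (c (j + k)) (c (ms + k)) with h1 | h1 | h1
      · exact absurd h1 hc
      · exact absurd h1 heq
      · exact h1
    have hstep : pvLoop c n ms j k p = pvLoop c n j (j + 1) 0 1 := by
      rw [pvLoop, dif_pos h, if_neg hc, if_neg heq]
    have inv' : pvInv c n j (j + 1) 0 1 := by
      refine ⟨by omega, by omega, by omega, by omega, ⟨1, le_refl 1, by omega⟩,
        (fun t ht => absurd ht (Nat.not_lt_zero t)), (fun x hx hxe => absurd hxe (by omega)),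
        (fun q hq0 hq1 => absurd hq1 (by omega)), ?_⟩
      intro q hq
      rcases Nat.eq_or_lt_of_le hq with hq0 | hq0
      · rw [← hq0]
      · rw [pvK_nil c (j + 1 + 0) q (by omega)]
        exact pvNil_le _
    have IHres := ih inv'
    rw [hstep]
    have hKmsj : pvK c n ms < pvK c n j := by
      apply pvLt_of_agree_lt c n n ms j k
      · intro v hv
        exact inv.h6 v hv
      · have := inv.h1; omega
      · omega
      · exact hgt
    refine ⟨?_, IHres.2.1, ?_, IHres.2.2.2⟩
    · refine Or.inr ⟨?_, IHres.2.1⟩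
      rcases IHres.1 with h1 | h1
      · omega
      · omega
    · intro q hq
      rcases hq with rfl | ⟨hjq, hqn⟩
      · exact le_trans (le_of_lt hKmsj) (IHres.2.2.1 j (Or.inl rfl))
      · rcases Nat.eq_or_lt_of_le hjq with hq0 | hq0
        · rw [← hq0]
          exact IHres.2.2.1 j (Or.inl rfl)
        · exact IHres.2.2.1 q (Or.inr ⟨by omega, hqn⟩)
  | case5 ms j k p h =>
    intro inv
    have hn : j + k = n := by
      have := inv.h3
      omega
    have hstep : pvLoop c n ms j k p = (ms, p) := by
      rw [pvLoop, dif_neg h]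
    rw [hstep]
    have hmsj := inv.h1
    refine ⟨Or.inl rfl, by omega, ?_, ?_⟩
    · intro q hq
      rcases hq with rfl | ⟨hjq, hqn⟩
      · exact le_refl _
      · have le1 : pvK c n q ≤ pvK c n (ms + (q - j)) := by
          apply pvLe_of_agree_prefix c n n q (ms + (q - j)) (k - (q - j))
          · intro v hv
            have h1 := inv.h6 ((q - j) + v) (by omega)
            rw [show q + v = j + ((q - j) + v) by omega, ← h1,
              show ms + ((q - j) + v) = ms + (q - j) + v by omega]
          · omega
          · omega
        have le2 : pvK c n (ms + (q - j)) ≤ pvK c n ms := by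
          have h2 := inv.h9 (ms + (q - j)) (by omega)
          rwa [hn] at h2
        exact le_trans le1 le2
    · show p = pvMinPer c n ms
      symm
      rw [pvMinPer, Nat.find_eq_iff]
      constructor
      · refine ⟨by have := inv.h2; omega, ?_⟩
        intro x hx hmsx hxp
        exact inv.h7 x hmsx (by omega)
      · intro q hq hcon
        obtain ⟨hq0, hqper⟩ := hcon
        obtain ⟨x, hx, hxe, hne⟩ := inv.h8 q hq0 hq
        exact hne (hqper x (by omega) hx (by omega))

-- ---- bridging port A to the abstract loop ----

lemma pvCharLt (a b : Char) : a < b ↔ ((a.toNat : Int) < (b.toNat : Int)) := by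
  rw [Char.lt_def, UInt32.lt_iff_toNat_lt]
  exact Iff.symm Nat.cast_lt

lemma pvCharEq (a b : Char) : a = b ↔ ((a.toNat : Int) = (b.toNat : Int)) := by
  constructor
  · intro h; rw [h]
  · intro h; exact Char.ext (UInt32.toNat_inj.mp (Nat.cast_injective h))

lemma pvCondIff (s : List Char) (invert : Bool) (i r : Nat) :
    (((invert && decide ((s.getD r ' ') < (s.getD i ' '))) || (!invert && decide ((s.getD i ' ') < (s.getD r ' ')))) = true)
      ↔ pvCv s invert i < pvCv s invert r := by
  cases invert
  · show ((false && _) || (true && decide _)) = true ↔ _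
    simp only [Bool.false_and, Bool.true_and, Bool.false_or, decide_eq_true_eq]
    exact pvCharLt _ _
  · show ((true && decide _) || (false && _)) = true ↔ _
    simp only [Bool.true_and, Bool.false_and, Bool.or_false, decide_eq_true_eq]
    rw [pvCharLt]
    show _ ↔ -_ < -_
    omega

lemma pvEqIff (s : List Char) (invert : Bool) (i r : Nat) :
    (s.getD i ' ' = s.getD r ' ') ↔ pvCv s invert i = pvCv s invert r := by
  cases invert
  · exact pvCharEq _ _
  · rw [pvCharEq]
    show _ ↔ -_ = -_
    omega

lemma pvBridgeA (s : List Char) (invert : Bool) :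
    ∀ n ms j k p, lexLoopA s invert n ms j k p =
      (((pvLoop (pvCv s invert) n ms j k p).1 : Int), ((pvLoop (pvCv s invert) n ms j k p).2 : Int)) := by
  intro n ms j k p
  induction ms, j, k, p using lexLoopA.induct s invert n with
  | case1 ms j k p h a b hc ih =>
    rw [lexLoopA, pvLoop, dif_pos h, dif_pos h, if_pos hc,
      if_pos ((pvCondIff s invert (j + k) (ms + k)).mp hc)]
    exact ih
  | case2 ms j k p h a b hc he hk ih =>
    rw [lexLoopA, pvLoop, dif_pos h, dif_pos h, if_neg hc,
      if_neg (fun hx => hc ((pvCondIff s invert (j + k) (ms + k)).mpr hx)),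
      if_pos he, if_pos ((pvEqIff s invert (j + k) (ms + k)).mp he), if_pos hk, if_pos hk]
    exact ih
  | case3 ms j k p h a b hc he hk ih =>
    rw [lexLoopA, pvLoop, dif_pos h, dif_pos h, if_neg hc,
      if_neg (fun hx => hc ((pvCondIff s invert (j + k) (ms + k)).mpr hx)),
      if_pos he, if_pos ((pvEqIff s invert (j + k) (ms + k)).mp he), if_neg hk, if_neg hk]
    exact ih
  | case4 ms j k p h a b hc he ih =>
    rw [lexLoopA, pvLoop, dif_pos h, dif_pos h, if_neg hc,
      if_neg (fun hx => hc ((pvCondIff s invert (j + k) (ms + k)).mpr hx)),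
      if_neg he, if_neg (fun hx => he ((pvEqIff s invert (j + k) (ms + k)).mpr hx))]
    exact ih
  | case5 ms j k p h =>
    rw [lexLoopA, pvLoop, dif_neg h, dif_neg h]

-- ---- bridging port B to the abstract spec ----

lemma pvMsFold (c : Nat → Int) (n : Nat) (vals : List Int)
    (hdrop : ∀ q, vals.drop q = pvK c n q) :
    ∀ len strt acc, acc < strt →
      (∀ q, q < strt → pvK c n q ≤ pvK c n acc) →
      ((List.range' strt len 1).foldl (fun ms i => if vals.drop ms < vals.drop i then i else ms) acc) < strt + len ∧
      (∀ q, q < strt + len → pvK c n q ≤ pvK c n ((List.range' strt len 1).foldl (fun ms i => if vals.drop ms < vals.drop i then i else ms) acc)) := by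
  intro len
  induction len with
  | zero =>
    intro strt acc hacc hbest
    simpa using ⟨by omega, hbest⟩
  | succ len ih =>
    intro strt acc hacc hbest
    have hstep : (List.range' strt (len + 1) 1) = strt :: List.range' (strt + 1) len 1 :=
      List.range'_succ
    rw [hstep, List.foldl_cons, hdrop acc, hdrop strt]
    by_cases hlt : pvK c n acc < pvK c n strt
    · rw [if_pos hlt]
      have h2 : ∀ q, q < strt + 1 → pvK c n q ≤ pvK c n strt := by
        intro q hq
        rcases Nat.lt_or_ge q strt with h | h
        · exact le_trans (hbest q h) (le_of_lt hlt)
        · have : q = strt := by omega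
          rw [this]
      have := ih (strt + 1) strt (by omega) h2
      constructor
      · have h3 := this.1; omega
      · intro q hq; exact this.2 q (by omega)
    · rw [if_neg hlt]
      have h2 : ∀ q, q < strt + 1 → pvK c n q ≤ pvK c n acc := by
        intro q hq
        rcases Nat.lt_or_ge q strt with h | h
        · exact hbest q h
        · have : q = strt := by omega
          rw [this]; exact not_lt.mp hlt
      have := ih (strt + 1) acc (by omega) h2
      constructor
      · have h3 := this.1; omega
      · intro q hq; exact this.2 q (by omega)

lemma pvPeriodFold (c : Nat → Int) (n M : Nat) (t : List Int) (ht : t = pvK c n M) :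
    ∀ p0, 0 < p0 →
      (∀ q, 0 < q → q < p0 → ¬(∀ x, x < n → M ≤ x → x + q < n → c x = c (x + q))) →
      periodLoopB t p0 = pvMinPer c n M := by
  have hlen : t.length = n - M := by rw [ht, pvK_length]
  have hget : ∀ i, i < n - M → t.getD i 0 = c (M + i) := by
    intro i hi
    rw [ht]
    show (pvSeg c M (n - M)).getD i 0 = c (M + i)
    rw [List.getD_eq_getElem?_getD]
    simp [pvSeg, hi]
  have hcond : ∀ p0, ((List.range (t.length - p0)).any
      (fun i => decide (t.getD i 0 ≠ t.getD (i + p0) 0)) = true) ↔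
      ¬(∀ x, x < n → M ≤ x → x + p0 < n → c x = c (x + p0)) := by
    intro p0
    simp only [List.any_eq_true, List.mem_range, decide_eq_true_eq]
    constructor
    · rintro ⟨i, hi, hne⟩ hall
      rw [hlen] at hi
      rw [hget i (by omega), hget (i + p0) (by omega)] at hne
      exact hne (by
        have := hall (M + i) (by omega) (by omega) (by omega)
        rw [this]; ring_nf)
    · intro hnall
      by_contra hno
      push Not at hno
      apply hnall
      intro x hx hMx hxp
      have hi : x - M < t.length - p0 := by omega
      have := hno (x - M) hi
      rw [hget (x - M) (by omega), hget ((x - M) + p0) (by omega)] at this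
      have hx1 : M + (x - M) = x := by omega
      have hx2 : M + ((x - M) + p0) = x + p0 := by omega
      rw [hx1, hx2] at this
      exact not_not.mp (fun hne => hne this)
  intro p0
  induction p0 using periodLoopB.induct t with
  | case1 p0 hany ih =>
    intro hpos hprev
    rw [periodLoopB, dif_pos hany]
    apply ih (by omega)
    intro q hq0 hq
    rcases Nat.lt_or_ge q p0 with h | h
    · exact hprev q hq0 h
    · have : q = p0 := by omega
      rw [this]
      exact (hcond p0).mp hany
  | case2 p0 hany =>
    intro hpos hprev
    rw [periodLoopB, dif_neg hany]
    symm
    rw [pvMinPer, Nat.find_eq_iff]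
    refine ⟨⟨hpos, ?_⟩, ?_⟩
    · have := (hcond p0).not.mp (by simpa using hany)
      simpa using not_not.mp this
    · intro m hm
      rintro ⟨hm0, hmper⟩
      exact hprev m hm0 hm hmper

lemma pvAltEval (needle : String) (len_needle : Int) (invert : Bool) (h : ¬ len_needle ≤ 0) :
    lex_search_alt needle len_needle invert =
      (((msLoopB (valsB invert (needle.toList.take len_needle.toNat)) len_needle.toNat : Nat) : Int),
       ((periodLoopB ((valsB invert (needle.toList.take len_needle.toNat)).drop
          (msLoopB (valsB invert (needle.toList.take len_needle.toNat)) len_needle.toNat)) 1 : Nat) : Int)) := by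
  rw [lex_search_alt, if_neg h]

lemma pvValsLen (invert : Bool) (s : List Char) : (valsB invert s).length = s.length := by
  cases invert <;> simp [valsB]

-- ===== VERDICT (by name: the statement is the Claim_ definition above) =====
theorem lex_search_spec : Claim_equal_lex_search := by
  intro needle len_needle invert _hdom hpre
  unfold Spec_lex_search
  rw [lex_search, pvBridgeA]
  by_cases hle : len_needle ≤ 0
  · rw [lex_search_alt, if_pos hle]
    have hn0 : len_needle.toNat = 0 := by omega
    rw [hn0, pvLoop, dif_neg (by omega : ¬ 1 + 0 < 0)]
    rfl
  · rw [pvAltEval needle len_needle invert hle]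
    set l := needle.toList with hldef
    set n := len_needle.toNat with hndef
    set c := pvCv l invert with hcdef
    set vals := valsB invert (l.take n) with hvdef
    have hn1 : 1 ≤ n := by omega
    by_cases hone : n = 1
    · -- degenerate length-1 case: both sides return (0, 1)
      have hA : pvLoop c n 0 1 0 1 = (0, 1) := by
        rw [hone, pvLoop, dif_neg (by omega : ¬ 1 + 0 < 1)]
      have hms : msLoopB vals n = 0 := by
        rw [hone, msLoopB]
        simp
      have hvl : vals.length ≤ 1 := by
        rw [hvdef, pvValsLen, List.length_take]
        omega
      have hper : periodLoopB (List.drop 0 vals) 1 = 1 := by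
        rw [List.drop_zero, periodLoopB, dif_neg]
        rw [show vals.length - 1 = 0 by omega]
        simp
      rw [hA, hms, hper]
    · -- main case: 2 ≤ n ≤ length of the needle
      have hn2 : 2 ≤ n := by omega
      have hln : n ≤ l.length := by
        rcases hpre with hp | hp
        · have hsl : (needle.length : Int) = (l.length : Int) := by
            rw [hldef, String.length_toList]
          omega
        · omega
      have hvlen : vals.length = n := by
        rw [hvdef, pvValsLen, List.length_take]
        omega
      have hdrop : ∀ q, vals.drop q = pvK c n q := by
        intro q
        apply List.ext_getElem
        · rw [List.length_drop, hvlen, pvK_length]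
        · intro i h1 h2
          rw [List.getElem_drop]
          have hqi : q + i < n := by
            rw [List.length_drop, hvlen] at h1
            omega
          have hK : (pvK c n q)[i] = c (q + i) := by
            simp [pvK, pvSeg]
          rw [hK]
          cases invert <;>
            simp [hvdef, valsB, hcdef, pvCv] <;>
            rw [List.getElem?_eq_getElem (show q + i < l.length by omega)] <;> rfl
      have inv0 : pvInv c n 0 1 0 1 := by
        refine ⟨by omega, by omega, by omega, by omega, ⟨1, le_refl 1, by omega⟩,
          (fun t ht => absurd ht (Nat.not_lt_zero t)), (fun x hx hxe => absurd hxe (by omega)),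
          (fun q hq0 hq1 => absurd hq1 (by omega)), ?_⟩
        intro q hq
        rcases Nat.eq_zero_or_pos q with hq0 | hq0
        · rw [hq0]
        · rw [pvK_nil c (1 + 0) q (by omega)]
          exact pvNil_le _
      have main := pvMain c n 0 1 0 1 inv0
      have hbestA : ∀ q, q < n → pvK c n q ≤ pvK c n (pvLoop c n 0 1 0 1).1 := by
        intro q hq
        apply main.2.2.1
        rcases Nat.eq_zero_or_pos q with hq0 | hq0
        · exact Or.inl hq0
        · exact Or.inr ⟨hq0, hq⟩
      have hmsB := pvMsFold c n vals hdrop (n - 1) 1 0 (by omega)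
        (by intro q hq
            have hq0 : q = 0 := by omega
            exact le_of_eq (congrArg (pvK c n) hq0))
      rw [show 1 + (n - 1) = n by omega] at hmsB
      have hmsdef : msLoopB vals n =
          (List.range' 1 (n - 1) 1).foldl (fun ms i => if vals.drop ms < vals.drop i then i else ms) 0 := rfl
      rw [← hmsdef] at hmsB
      have hMeq : (pvLoop c n 0 1 0 1).1 = msLoopB vals n := by
        have h1 := hbestA (msLoopB vals n) hmsB.1
        have h2 := hmsB.2 (pvLoop c n 0 1 0 1).1 main.2.1
        have heq2 : pvK c n (pvLoop c n 0 1 0 1).1 = pvK c n (msLoopB vals n) :=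
          le_antisymm h2 h1
        have hl2 := congrArg List.length heq2
        rw [pvK_length, pvK_length] at hl2
        have := main.2.1
        have := hmsB.1
        omega
      have hperB := pvPeriodFold c n (msLoopB vals n) (vals.drop (msLoopB vals n))
        (hdrop (msLoopB vals n)) 1 (by omega)
        (by intro q h0 h1; exact absurd h1 (by omega))
      rw [main.2.2.2, hMeq, hperB]
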